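-- pv_equiv track=rewrite | github.com/daniel-reich/ubiquitous-fiesta | F77JQs68RSeTBiGtv_14.py | diamond_sum
-- ===== SOURCE A (Python) =====
-- def diamond_sum(n):
--   A=list(range(1, n**2+1))
--   lst=[A[i:i+n] for i in range(0, len(A), n)]
--   dsum=0
--   for i in range(n):
--     for j in range(n):
--       if j+i==(n-1)//2 or j-i==-(n-1)//2 or j+i==3*(n-1)//2 or j-i==(n-1)//2:
--         dsum+=lst[i][j]
--   return dsum
-- ===== SOURCE B (Python) =====
-- def diamond_sum(n):
--     m = (n - 1) // 2
--     p = -(n - 1) // 2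
--     k = 3 * (n - 1) // 2
--     total = 0
--     for i in range(n):
--         for j in {m - i, i + p, k - i, i + m}:
--             if 0 <= j < n:
--                 total += i * n + j + 1
--     return total
-- ===== Notes on version B (the rewrite author's own statement) =====
-- stated objective: faster
-- what changed: B drops A's n^2 grid materialisation and full double scan: per row it computes the at most four diamond column indices from the diagonal equations and uses the closed-form cell value i*n+j+1, an O(n) loop.
import Mathlib
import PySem

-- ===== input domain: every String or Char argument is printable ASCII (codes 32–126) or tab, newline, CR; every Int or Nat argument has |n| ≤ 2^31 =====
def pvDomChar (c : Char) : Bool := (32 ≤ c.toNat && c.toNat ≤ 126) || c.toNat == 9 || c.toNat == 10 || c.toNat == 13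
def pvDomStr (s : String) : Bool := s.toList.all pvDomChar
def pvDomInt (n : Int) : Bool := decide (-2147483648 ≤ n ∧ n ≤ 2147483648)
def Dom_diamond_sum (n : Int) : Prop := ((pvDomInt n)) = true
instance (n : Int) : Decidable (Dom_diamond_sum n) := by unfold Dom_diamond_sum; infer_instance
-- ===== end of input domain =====

-- B replaces A's scan of all n^2 grid cells by a loop over the n rows that visits only the
-- (at most four) diamond cells of each row, using the closed-form cell value i*n+j+1.

-- ===== PORT A =====
def diamond_sum (n : Int) : Int :=
  let A := PySem.List.pyRange 1 (n ^ 2 + 1) 1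
  let lst := (PySem.List.pyRange 0 (A.length : Int) n).map
      (fun i => PySem.List.slice A (some i) (some (i + n)))
  (PySem.List.pyRange 0 n 1).foldl (fun dsum i =>
    (PySem.List.pyRange 0 n 1).foldl (fun dsum j =>
      if j + i = PySem.Int.floordiv (n - 1) 2 ∨
         j - i = PySem.Int.floordiv (-(n - 1)) 2 ∨
         j + i = PySem.Int.floordiv (3 * (n - 1)) 2 ∨
         j - i = PySem.Int.floordiv (n - 1) 2 then
        dsum + PySem.List.pyGetD (PySem.List.pyGetD lst i []) j 0
      else dsum) dsum) 0

-- ===== PORT B =====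
def diamond_sum_alt (n : Int) : Int :=
  let m := PySem.Int.floordiv (n - 1) 2
  let p := PySem.Int.floordiv (-(n - 1)) 2
  let k := PySem.Int.floordiv (3 * (n - 1)) 2
  (PySem.List.pyRange 0 n 1).foldl (fun total i =>
    (PySem.Set.ofList [m - i, i + p, k - i, i + m]).foldl (fun total j =>
      if 0 ≤ j ∧ j < n then total + (i * n + j + 1) else total) total) 0

-- ===== PRECONDITION & SPEC =====
-- Pre_ excludes only n = 0, where Python A raises ValueError (range() arg 3 must not be zero).
def Pre_diamond_sum (n : Int) : Prop := n ≠ 0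
instance (n : Int) : Decidable (Pre_diamond_sum n) := by unfold Pre_diamond_sum; infer_instance
def pvWitness_diamond_sum : Int := 5

def Spec_diamond_sum (n : Int) (out : Int) : Prop := out = diamond_sum_alt n
instance (n : Int) (out : Int) : Decidable (Spec_diamond_sum n out) := by unfold Spec_diamond_sum; infer_instance

-- ===== CLAIM (what is proved, stated in full; the proofs are below) =====
def Claim_equal_diamond_sum : Prop := ∀ (n : Int), Dom_diamond_sum n → Pre_diamond_sum n → Spec_diamond_sum n (diamond_sum n)

-- ===== LEMMAS AND PROOFS =====

-- a fold that adds f j when j ∈ S, written as a filtered map-sum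
theorem foldl_if_mem_add (R : List Int) (S : List Int) (f : Int → Int) (acc : Int) :
    R.foldl (fun a j => if j ∈ S then a + f j else a) acc
      = acc + ((R.filter (fun j => decide (j ∈ S))).map f).sum := by
  induction R generalizing acc with
  | nil => simp
  | cons x R ih =>
    by_cases hx : x ∈ S <;> simp [hx, ih, add_assoc]

-- the same summands in either of two orders: both folds add f over R ∩ S
theorem foldl_if_mem_comm (R S : List Int) (f : Int → Int)
    (hR : R.Nodup) (hS : S.Nodup) (acc : Int) :
    R.foldl (fun a j => if j ∈ S then a + f j else a) acc
      = S.foldl (fun a j => if j ∈ R then a + f j else a) acc := by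
  rw [foldl_if_mem_add, foldl_if_mem_add]
  have hperm : (R.filter (fun j => decide (j ∈ S))).Perm (S.filter (fun j => decide (j ∈ R))) := by
    rw [List.perm_ext_iff_of_nodup (hR.filter _) (hS.filter _)]
    intro a
    simp [List.mem_filter, and_comm]
  rw [(hperm.map f).sum_eq]

-- A's grid cell lst[i][j] has the closed-form value i*n+j+1
theorem grid_cell (n i j : Int) (hn : 0 < n) (hi0 : 0 ≤ i) (hi : i < n)
    (hj0 : 0 ≤ j) (hj : j < n) :
    PySem.List.pyGetD
      (PySem.List.pyGetD
        ((PySem.List.pyRange 0 (((PySem.List.pyRange 1 (n ^ 2 + 1) 1).length : Int)) n).map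
          (fun s => PySem.List.slice (PySem.List.pyRange 1 (n ^ 2 + 1) 1) (some s) (some (s + n))))
        i []) j 0 = i * n + j + 1 := by
  have hni0 : (0:Int) ≤ n * i := by positivity
  have hlenA : ((PySem.List.pyRange 1 (n ^ 2 + 1) 1).length : Int) = n ^ 2 := by
    rw [PySem.List.length_pyRange_one]
    have : (0:Int) ≤ n ^ 2 := by positivity
    omega
  rw [hlenA]
  have houter : PySem.List.pyRange 0 (n ^ 2) n
      = (List.range n.toNat).map (fun (k : Nat) => n * (k : Int)) := by
    rw [PySem.List.pyRange_of_pos _ _ hn]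
    have h1 : (0:Int) < n ^ 2 := by positivity
    have h2 : ((n ^ 2 - 0 + n - 1) / n).toNat = n.toNat := by
      have he : n ^ 2 - 0 + n - 1 = (n - 1) + n * n := by ring
      rw [he, Int.add_mul_ediv_left _ _ (by omega), Int.ediv_eq_zero_of_lt (by omega) (by omega)]
      omega
    rw [if_pos h1, h2]
    simp only [zero_add]
  rw [houter, List.map_map]
  have hi_lt : i.toNat < n.toNat := by omega
  have hrow : PySem.List.pyGetD
      ((List.range n.toNat).map ((fun s => PySem.List.slice (PySem.List.pyRange 1 (n ^ 2 + 1) 1) (some s) (some (s + n))) ∘ (fun (k : Nat) => n * (k : Int)))) i []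
      = PySem.List.slice (PySem.List.pyRange 1 (n ^ 2 + 1) 1) (some (n * i)) (some (n * i + n)) := by
    rw [PySem.List.pyGetD_eq_getElem _ _ hi0 (by simp; omega)]
    simp only [List.getElem_map, List.getElem_range, Function.comp_apply]
    rw [Int.toNat_of_nonneg hi0]
  rw [hrow]
  have hslice : PySem.List.slice (PySem.List.pyRange 1 (n ^ 2 + 1) 1) (some (n * i)) (some (n * i + n))
      = ((PySem.List.pyRange 1 (n ^ 2 + 1) 1).drop (n * i).toNat).take n.toNat := by
    rw [PySem.List.slice_toNat _ hni0 (by omega)]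
    congr 1
    omega
  rw [hslice]
  have hAlen : (PySem.List.pyRange 1 (n ^ 2 + 1) 1).length = (n ^ 2).toNat := by
    rw [PySem.List.length_pyRange_one]; congr 1; ring_nf
  have hni : (n * i).toNat = n.toNat * i.toNat := by
    rw [Int.toNat_mul (by omega) hi0]
  have hsq : (n ^ 2).toNat = n.toNat * n.toNat := by
    have he : n ^ 2 = n * n := by ring
    rw [he, Int.toNat_mul (by omega) (by omega)]
  have hj_lt : j.toNat < (((PySem.List.pyRange 1 (n ^ 2 + 1) 1).drop (n * i).toNat).take n.toNat).length := by
    rw [List.length_take, List.length_drop, hAlen]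
    have h1 : i.toNat + 1 ≤ n.toNat := by omega
    have h2 : n.toNat * i.toNat + n.toNat ≤ n.toNat * n.toNat := by nlinarith
    omega
  rw [PySem.List.pyGetD_eq_getElem _ _ hj0
    (by rw [← Int.toNat_of_nonneg hj0]; exact_mod_cast hj_lt)]
  rw [List.getElem_take, List.getElem_drop]
  rw [PySem.List.getElem_pyRange_one]
  have hc : ((n * i).toNat : Int) = n * i := Int.toNat_of_nonneg hni0
  push_cast [hc, Int.toNat_of_nonneg hj0]
  ring

-- ===== VERDICT (by name: the statement is the Claim_ definition above) =====
theorem diamond_sum_spec : Claim_equal_diamond_sum := by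
  intro n _ _
  unfold Spec_diamond_sum diamond_sum diamond_sum_alt
  dsimp only
  by_cases hn : 0 < n
  case neg =>
    have hnil : PySem.List.pyRange 0 n 1 = [] := PySem.List.pyRange_one_eq_nil (by omega)
    rw [hnil]
    simp
  case pos =>
    apply PySem.List.foldl_congr_mem
    intro acc i hiR
    rw [PySem.List.mem_pyRange_one] at hiR
    have step1 :
        (PySem.List.pyRange 0 n 1).foldl (fun dsum j =>
          if j + i = PySem.Int.floordiv (n - 1) 2 ∨
             j - i = PySem.Int.floordiv (-(n - 1)) 2 ∨
             j + i = PySem.Int.floordiv (3 * (n - 1)) 2 ∨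
             j - i = PySem.Int.floordiv (n - 1) 2 then
            dsum + PySem.List.pyGetD (PySem.List.pyGetD
              ((PySem.List.pyRange 0 (((PySem.List.pyRange 1 (n ^ 2 + 1) 1).length : Int)) n).map
                (fun s => PySem.List.slice (PySem.List.pyRange 1 (n ^ 2 + 1) 1) (some s) (some (s + n))))
              i []) j 0
          else dsum) acc
        = (PySem.List.pyRange 0 n 1).foldl (fun a j =>
            if j ∈ PySem.Set.ofList [PySem.Int.floordiv (n - 1) 2 - i,
                i + PySem.Int.floordiv (-(n - 1)) 2,
                PySem.Int.floordiv (3 * (n - 1)) 2 - i,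
                i + PySem.Int.floordiv (n - 1) 2] then a + (i * n + j + 1) else a) acc := by
      apply PySem.List.foldl_congr_mem
      intro a j hjR
      rw [PySem.List.mem_pyRange_one] at hjR
      have hw := grid_cell n i j hn hiR.1 hiR.2 hjR.1 hjR.2
      have hiff : (j + i = PySem.Int.floordiv (n - 1) 2 ∨
             j - i = PySem.Int.floordiv (-(n - 1)) 2 ∨
             j + i = PySem.Int.floordiv (3 * (n - 1)) 2 ∨
             j - i = PySem.Int.floordiv (n - 1) 2) ↔
          j ∈ PySem.Set.ofList [PySem.Int.floordiv (n - 1) 2 - i,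
                i + PySem.Int.floordiv (-(n - 1)) 2,
                PySem.Int.floordiv (3 * (n - 1)) 2 - i,
                i + PySem.Int.floordiv (n - 1) 2] := by
        rw [PySem.Set.mem_ofList]
        simp only [List.mem_cons, List.not_mem_nil, or_false]
        omega
      exact if_congr hiff (by rw [hw]) rfl
    rw [step1]
    rw [foldl_if_mem_comm _ _ _ (PySem.List.nodup_pyRange_one 0 n) (PySem.Set.nodup_ofList _) acc]
    apply PySem.List.foldl_congr_mem
    intro a j _
    exact if_congr PySem.List.mem_pyRange_one rfl rfl
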